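-- pv_equiv track=rewrite | github.com/siddu1998/ParallelOPM | ParallelOPM-main/CODE/GLYPH/Archive/Trash/MapManage.py | filterAvailableCoords
-- ===== SOURCE A (Python) =====
-- import copy
--
-- def filterAvailableCoords(coords, elementCoords, intersectionsCoords):
--     '''
--     Remove the default element coordinates and intersections coordinates from the coords
--     Used for area separation
--     '''
--     res = copy.copy(coords)
--     for elementCoord in elementCoords:
--         if elementCoord in res:
--             res.remove(elementCoord)
--     for intersectionsCoord in intersectionsCoords:
--         if intersectionsCoord in res:
--             res.remove(intersectionsCoord)
--     return res
-- ===== SOURCE B (Python) =====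
-- def filterAvailableCoords(coords, elementCoords, intersectionsCoords):
--     '''
--     Remove the default element coordinates and intersections coordinates from the coords
--     Used for area separation
--     '''
--     need = {}
--     for c in elementCoords:
--         need[c] = need.get(c, 0) + 1
--     for c in intersectionsCoords:
--         need[c] = need.get(c, 0) + 1
--     res = []
--     for c in coords:
--         if need.get(c, 0) > 0:
--             need[c] = need[c] - 1
--         else:
--             res.append(c)
--     return res
-- ===== Notes on version B (the rewrite author's own statement) =====
-- stated objective: faster
-- what changed: Replaces repeated 'in'-test + list.remove scans (one linear scan per removal candidate) by a removal-count dictionary built once and a single pass over coords that skips an element while its count is positive.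
import Mathlib
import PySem

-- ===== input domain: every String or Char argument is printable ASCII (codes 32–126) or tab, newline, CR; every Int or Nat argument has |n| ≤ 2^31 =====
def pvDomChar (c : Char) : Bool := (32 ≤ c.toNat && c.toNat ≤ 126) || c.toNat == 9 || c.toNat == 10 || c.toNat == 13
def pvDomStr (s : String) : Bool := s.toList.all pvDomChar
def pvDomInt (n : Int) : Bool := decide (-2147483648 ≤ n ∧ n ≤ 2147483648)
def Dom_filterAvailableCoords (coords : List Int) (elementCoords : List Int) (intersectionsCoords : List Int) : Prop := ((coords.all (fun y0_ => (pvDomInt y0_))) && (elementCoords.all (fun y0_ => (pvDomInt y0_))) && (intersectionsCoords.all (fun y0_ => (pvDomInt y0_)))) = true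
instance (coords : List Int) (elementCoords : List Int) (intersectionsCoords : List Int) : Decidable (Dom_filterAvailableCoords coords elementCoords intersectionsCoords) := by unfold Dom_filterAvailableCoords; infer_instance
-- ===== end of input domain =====

-- B replaces A's repeated membership-test + list.remove scans by a removal-count
-- dictionary built once and a single pass over coords (objective: faster).

-- ===== PORT A =====
-- one step of A's loop body: 'if x in res: res.remove(x)' (remove? is some here since x ∈ res)
def pvRemA (res : List Int) (x : Int) : List Int :=
  if x ∈ res then (PySem.List.remove? res x).getD res else res

def filterAvailableCoords (coords : List Int) (elementCoords : List Int) (intersectionsCoords : List Int) : List Int :=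
  let res := coords
  let res := elementCoords.foldl pvRemA res
  let res := intersectionsCoords.foldl pvRemA res
  res

-- ===== PORT B =====
def filterAvailableCoords_alt (coords : List Int) (elementCoords : List Int) (intersectionsCoords : List Int) : List Int :=
  let need : PySem.Dict Int Int := elementCoords.foldl (fun d c => d.insert c (d.getD c 0 + 1)) PySem.Dict.empty
  let need := intersectionsCoords.foldl (fun d c => d.insert c (d.getD c 0 + 1)) need
  (coords.foldl (fun (st : PySem.Dict Int Int × List Int) c =>
      if st.1.getD c 0 > 0 then (st.1.insert c (st.1.getD c 0 - 1), st.2)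
      else (st.1, st.2 ++ [c])) (need, [])).2

-- ===== PRECONDITION & SPEC =====
def Spec_filterAvailableCoords (coords : List Int) (elementCoords : List Int) (intersectionsCoords : List Int) (out : List Int) : Prop := out = filterAvailableCoords_alt coords elementCoords intersectionsCoords
instance (coords : List Int) (elementCoords : List Int) (intersectionsCoords : List Int) (out : List Int) : Decidable (Spec_filterAvailableCoords coords elementCoords intersectionsCoords out) := by unfold Spec_filterAvailableCoords; infer_instance

-- ===== CLAIM (what is proved, stated in full; the proofs are below) =====
def Claim_equal_filterAvailableCoords : Prop := ∀ (coords : List Int) (elementCoords : List Int) (intersectionsCoords : List Int), Dom_filterAvailableCoords coords elementCoords intersectionsCoords → Spec_filterAvailableCoords coords elementCoords intersectionsCoords (filterAvailableCoords coords elementCoords intersectionsCoords)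

-- ===== LEMMAS AND PROOFS =====

-- canonical form both sides are reduced to: remove the first (f x) occurrences of each x
def pvScrub (f : Int → Nat) : List Int → List Int
  | [] => []
  | c :: cs => if f c > 0 then pvScrub (fun x => if x = c then f c - 1 else f x) cs
               else c :: pvScrub f cs

lemma pvScrub_cons_pos (f : Int → Nat) (c : Int) (cs : List Int) (h : f c > 0) :
    pvScrub f (c :: cs) = pvScrub (fun x => if x = c then f c - 1 else f x) cs := by
  simp [pvScrub, h]

lemma pvScrub_cons_neg (f : Int → Nat) (c : Int) (cs : List Int) (h : f c = 0) :
    pvScrub f (c :: cs) = c :: pvScrub f cs := by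
  simp [pvScrub, h]

lemma pvScrub_zero (f : Int → Nat) (h : ∀ x, f x = 0) (l : List Int) : pvScrub f l = l := by
  induction l with
  | nil => rfl
  | cons c cs ih => rw [pvScrub_cons_neg f c cs (h c), ih]

lemma pvRemA_cons_of_ne (c r : Int) (cs : List Int) (h : c ≠ r) :
    pvRemA (c :: cs) r = c :: pvRemA cs r := by
  by_cases hm : r ∈ cs
  · obtain ⟨w, hw⟩ : ∃ w, PySem.List.remove? cs r = some w :=
      Option.ne_none_iff_exists'.mp (by simp [PySem.List.remove?_eq_none_iff, hm])
    have hr : PySem.List.remove? (c :: cs) r = some (c :: w) := by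
      rw [PySem.List.remove?_cons_of_ne cs h, hw]; rfl
    have hm' : r ∈ c :: cs := List.mem_cons_of_mem _ hm
    simp [pvRemA, hm, hm', hr, hw]
  · have hmem : r ∉ c :: cs := by
      simp only [List.mem_cons]
      rintro (h1 | h2)
      · exact h h1.symm
      · exact hm h2
    simp [pvRemA, hm, hmem]

lemma pvScrub_bump (r : Int) (l : List Int) (f : Int → Nat) :
    pvScrub (fun x => if x = r then f x + 1 else f x) l = pvScrub f (pvRemA l r) := by
  induction l generalizing f with
  | nil => simp [pvRemA, pvScrub]
  | cons c cs ih =>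
    by_cases hc : c = r
    · subst hc
      rw [pvScrub_cons_pos _ c cs (by simp)]
      have h1 : (fun x => if x = c then (if c = c then f c + 1 else f c) - 1
                 else if x = c then f x + 1 else f x) = f := by
        funext x; by_cases hx : x = c <;> simp [hx]
      rw [h1]
      have h2 : pvRemA (c :: cs) c = cs := by simp [pvRemA]
      rw [h2]
    · rw [pvRemA_cons_of_ne c r cs hc]
      by_cases hf : f c > 0
      · rw [pvScrub_cons_pos _ c cs (by simp [hc, hf]),
            pvScrub_cons_pos f c (pvRemA cs r) hf]
        have h2 : (fun x => if x = c then (if c = r then f c + 1 else f c) - 1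
                   else if x = r then f x + 1 else f x)
            = (fun x => if x = r then (if x = c then f c - 1 else f x) + 1
               else if x = c then f c - 1 else f x) := by
          funext x
          by_cases hx : x = c
          · subst hx; simp [hc]
          · have hc' : ¬ r = c := fun e => hc e.symm
            by_cases hr : x = r <;> simp [hx, hr, hc']
        rw [h2, ih]
      · have hf0 : f c = 0 := by omega
        rw [pvScrub_cons_neg _ c cs (by simp [hc, hf0]),
            pvScrub_cons_neg f c (pvRemA cs r) hf0, ih]

lemma pvFoldA_eq_scrub (rs : List Int) (coords : List Int) :
    rs.foldl pvRemA coords = pvScrub (fun x => rs.count x) coords := by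
  induction rs generalizing coords with
  | nil => simp [pvScrub_zero]
  | cons r rs ih =>
    have hcnt : (fun x => (r :: rs).count x)
        = (fun x => if x = r then rs.count x + 1 else rs.count x) := by
      funext x
      by_cases hx : x = r
      · simp [hx]
      · have hx' : ¬ r = x := fun e => hx e.symm
        simp [hx, hx']
    rw [List.foldl_cons, ih, hcnt, pvScrub_bump]

lemma pvFoldB_eq_scrub (coords : List Int) (d : PySem.Dict Int Int) (acc : List Int)
    (g : Int → Nat) (hd : ∀ x, d.getD x 0 = (g x : Int)) :
    (coords.foldl (fun (st : PySem.Dict Int Int × List Int) c =>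
        if st.1.getD c 0 > 0 then (st.1.insert c (st.1.getD c 0 - 1), st.2)
        else (st.1, st.2 ++ [c])) (d, acc)).2 = acc ++ pvScrub g coords := by
  induction coords generalizing d acc g with
  | nil => simp [pvScrub]
  | cons c cs ih =>
    by_cases hg : g c > 0
    · have hpos : d.getD c 0 > 0 := by rw [hd c]; exact_mod_cast hg
      rw [List.foldl_cons]
      simp only [if_pos hpos]
      rw [ih (d.insert c (d.getD c 0 - 1)) acc (fun x => if x = c then g c - 1 else g x)
        (by
          intro x
          rw [PySem.Dict.getD_insert]
          by_cases hx : x = c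
          · simp [hx, hd c]; omega
          · simp [hx, hd x])]
      rw [pvScrub_cons_pos g c cs hg]
    · have hg0 : g c = 0 := by omega
      have hz : ¬ d.getD c 0 > 0 := by rw [hd c]; omega
      rw [List.foldl_cons]
      simp only [if_neg hz]
      rw [ih d (acc ++ [c]) g hd, pvScrub_cons_neg g c cs hg0, List.append_assoc]
      rfl

-- ===== VERDICT (by name: the statement is the Claim_ definition above) =====
theorem filterAvailableCoords_spec : Claim_equal_filterAvailableCoords := by
  intro coords e i _
  show filterAvailableCoords coords e i = filterAvailableCoords_alt coords e i
  unfold filterAvailableCoords filterAvailableCoords_alt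
  dsimp only
  rw [← List.foldl_append, pvFoldA_eq_scrub]
  rw [pvFoldB_eq_scrub coords _ [] (fun x => (e ++ i).count x)
    (by
      intro x
      rw [PySem.Dict.getD_foldl_insert_add_one, PySem.Dict.getD_foldl_insert_add_one]
      simp [List.count_append])]
  simp
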